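-- pv_equiv track=rewrite | github.com/orez-/python-sundry | squirt.py | square_factors
-- ===== SOURCE A (Python) =====
-- import itertools
--
-- def square_factors(value):
--     factor = 1
--     for i in itertools.count(2):
--         square = i * i
--         if square > value:
--             return factor, value
--         while value % square == 0:
--             value //= square
--             factor *= i
-- ===== SOURCE B (Python) =====
-- def square_factors(value):
--     best = 1
--     k = 1
--     while k * k <= value:
--         if value % (k * k) == 0:
--             best = k
--         k += 1
--     return best, value // (best * best)
-- ===== Notes on version B (the rewrite author's own statement) =====
-- stated objective: alternative
-- what changed: A factors by repeatedly stripping i*i out of the shrinking value inside a trial loop; B never modifies or factors the value at all: it scans k = 1..isqrt(value) testing whether k*k divides value, keeps the largest such k, and returns (k, value // (k*k)) - the square part computed directly as the maximal square divisor.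
import Mathlib
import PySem

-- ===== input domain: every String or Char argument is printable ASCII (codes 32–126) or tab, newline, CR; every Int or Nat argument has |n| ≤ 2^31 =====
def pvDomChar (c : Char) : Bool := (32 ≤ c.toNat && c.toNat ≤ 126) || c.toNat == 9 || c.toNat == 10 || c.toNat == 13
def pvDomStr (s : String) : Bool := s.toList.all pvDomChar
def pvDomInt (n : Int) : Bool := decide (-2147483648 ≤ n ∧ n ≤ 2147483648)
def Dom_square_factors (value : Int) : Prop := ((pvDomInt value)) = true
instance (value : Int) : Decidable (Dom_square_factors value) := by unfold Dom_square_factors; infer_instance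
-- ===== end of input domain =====

-- B computes the square part directly as the MAXIMAL square divisor: it scans k = 1..⌊√value⌋
-- testing k*k ∣ value and keeps the largest such k, never factoring or modifying value;
-- alternative algorithm, same asymptotic cost. Fuel parameters are pure termination guards
-- that always exceed the number of iterations the Python performs.

-- ===== PORT A =====
-- inner `while value % square == 0` loop
def squirtAInner (fuel : Nat) (i value factor : Int) : Int × Int :=
  match fuel with
  | 0 => (value, factor)
  | fuel + 1 =>
    if PySem.Int.mod value (i * i) = 0 then
      squirtAInner fuel i (PySem.Int.floordiv value (i * i)) (factor * i)
    else (value, factor)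

-- `for i in itertools.count(2)` with the early return `if square > value`
def squirtAOuter (fuel : Nat) (i factor value : Int) : Int × Int :=
  match fuel with
  | 0 => (factor, value)
  | fuel + 1 =>
    if i * i > value then (factor, value)
    else
      let p := squirtAInner value.toNat i value factor
      squirtAOuter fuel (i + 1) p.2 p.1

def square_factors (value : Int) : Int × Int :=
  squirtAOuter (value.toNat + 1) 2 1 value

-- ===== PORT B =====
-- `while k * k <= value` loop updating `best` whenever k*k divides value
def squirtBLoop (fuel : Nat) (k best value : Int) : Int :=
  match fuel with
  | 0 => best
  | fuel + 1 =>
    if k * k ≤ value then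
      squirtBLoop fuel (k + 1) (if PySem.Int.mod value (k * k) = 0 then k else best) value
    else best

def square_factors_alt (value : Int) : Int × Int :=
  let b := squirtBLoop (value.toNat + 1) 1 1 value
  (b, PySem.Int.floordiv value (b * b))

-- ===== PRECONDITION & SPEC =====
def Spec_square_factors (value : Int) (out : Int × Int) : Prop := out = square_factors_alt value
instance (value : Int) (out : Int × Int) : Decidable (Spec_square_factors value out) := by unfold Spec_square_factors; infer_instance

-- ===== CLAIM (what is proved, stated in full; the proofs are below) =====
def Claim_equal_square_factors : Prop := ∀ (value : Int), Dom_square_factors value → Spec_square_factors value (square_factors value)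

-- ===== LEMMAS AND PROOFS =====

-- key number-theoretic fact: against a squarefree cofactor, square divisibility is linear
lemma nat_key (a b c : ℕ) (ha : a ≠ 0) (hb : b ≠ 0) (hc : Squarefree c)
    (h : a ^ 2 ∣ b ^ 2 * c) : a ∣ b := by
  have hc0 : c ≠ 0 := hc.ne_zero
  rw [← Nat.factorization_le_iff_dvd ha hb]
  have h2 : (a ^ 2).factorization ≤ (b ^ 2 * c).factorization :=
    (Nat.factorization_le_iff_dvd (pow_ne_zero 2 ha)
      (mul_ne_zero (pow_ne_zero 2 hb) hc0)).mpr h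
  intro p
  have hp := h2 p
  rw [Nat.factorization_pow, Nat.factorization_mul (pow_ne_zero 2 hb) hc0,
    Nat.factorization_pow] at hp
  have hc1 : c.factorization p ≤ 1 := hc.natFactorization_le_one p
  simp only [Finsupp.coe_add, Finsupp.coe_smul, Pi.add_apply, Pi.smul_apply, smul_eq_mul] at hp
  omega

-- Int version: v = F²·R with R > 0 squarefree-as-Int; any j ≥ 1 with j² ∣ v satisfies j ≤ F
lemma int_key {F R v : Int} (hF : 0 < F) (hR : 0 < R)
    (hsq : ∀ x : Int, 2 ≤ x → ¬ x * x ∣ R) (hv : F * F * R = v) :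
    ∀ j : Int, 1 ≤ j → j * j ∣ v → j ≤ F := by
  intro j hj hdvd
  have hsqn : Squarefree R.toNat := by
    intro x hx
    by_contra hux
    have hx0 : x ≠ 0 := by rintro rfl; simp at hx; omega
    have hx2 : 2 ≤ x := by
      rcases Nat.lt_or_ge x 2 with h | h
      · exfalso; interval_cases x
        · exact hx0 rfl
        · exact hux isUnit_one
      · exact h
    refine hsq (x : Int) (by exact_mod_cast hx2) ?_
    have : ((x * x : ℕ) : Int) ∣ ((R.toNat : ℕ) : Int) := Int.natCast_dvd_natCast.mpr hx
    rwa [Int.toNat_of_nonneg (le_of_lt hR), Nat.cast_mul] at this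
  have hdn : j.toNat ^ 2 ∣ F.toNat ^ 2 * R.toNat := by
    have hcast : ((j.toNat ^ 2 : ℕ) : Int) ∣ ((F.toNat ^ 2 * R.toNat : ℕ) : Int) := by
      push_cast
      rw [Int.toNat_of_nonneg (by omega : (0:Int) ≤ j),
        Int.toNat_of_nonneg (le_of_lt hF), Int.toNat_of_nonneg (le_of_lt hR)]
      calc (j:Int) ^ 2 ∣ v := by rw [sq]; exact hdvd
        _ = F ^ 2 * R := by rw [← hv]; ring
    exact_mod_cast hcast
  have : j.toNat ∣ F.toNat :=
    nat_key _ _ _ (by omega) (by omega) hsqn hdn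
  have := Nat.le_of_dvd (by omega) this
  omega

-- characterization of A's inner loop: enough fuel strips all squares i*i from value
lemma aInner_char : ∀ (fuel : Nat) (i v f : Int), 2 ≤ i → 0 < v → 0 < f →
    v.toNat ≤ fuel →
    ∃ v' f', squirtAInner fuel i v f = (v', f') ∧ 0 < v' ∧ v' ∣ v ∧
      f' * f' * v' = f * f * v ∧ 0 < f' ∧ ¬ (i * i ∣ v') := by
  intro fuel
  induction fuel with
  | zero => intro i v f hi hv hf hfuel; omega
  | succ fuel ih =>
    intro i v f hi hv hf hfuel
    rw [squirtAInner]
    by_cases hd : i * i ∣ v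
    · rw [if_pos ((PySem.Int.mod_eq_zero_iff_dvd v (i*i)).mpr hd)]
      obtain ⟨c, hc⟩ := hd
      have hii : 0 < i * i := by nlinarith
      have hc0 : 0 < c := by nlinarith
      have hdiv : PySem.Int.floordiv v (i * i) = c := by
        rw [PySem.Int.floordiv_eq_ediv_of_pos hii, hc, Int.mul_ediv_cancel_left _ (by omega)]
      have hclt : c < v := by nlinarith
      obtain ⟨v', f', heq, hv', hdvd, hprod, hf', hnd⟩ :=
        ih i c (f * i) hi hc0 (by nlinarith) (by omega)
      refine ⟨v', f', by rw [hdiv]; exact heq, hv', dvd_trans hdvd ⟨i * i, by rw [hc]; ring⟩,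
        ?_, hf', hnd⟩
      rw [hprod, hc]; ring
    · rw [if_neg (fun h => hd ((PySem.Int.mod_eq_zero_iff_dvd v (i*i)).mp h))]
      exact ⟨v, f, rfl, hv, dvd_rfl, rfl, hf, hd⟩

-- characterization of A's outer loop: with enough fuel it returns (F, R) with F²·R the
-- invariant product and R free of square divisors
lemma aOuter_char : ∀ (fuel : Nat) (i f v : Int), 2 ≤ i → 0 < v → 0 < f →
    (∀ j : Int, 2 ≤ j → j < i → ¬ j * j ∣ v) →
    v < (i + (fuel : Int) - 1) * (i + (fuel : Int) - 1) →
    ∃ F R, squirtAOuter fuel i f v = (F, R) ∧ 0 < F ∧ 0 < R ∧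
      F * F * R = f * f * v ∧ (∀ j : Int, 2 ≤ j → ¬ j * j ∣ R) := by
  intro fuel
  induction fuel with
  | zero =>
    intro i f v hi hv hf hsmall hsz
    refine ⟨f, v, rfl, hf, hv, rfl, ?_⟩
    intro j hj hdvd
    rcases lt_or_ge j i with h | h
    · exact hsmall j hj h hdvd
    · have : j * j ≤ v := Int.le_of_dvd hv hdvd
      push_cast at hsz
      nlinarith
  | succ fuel ih =>
    intro i f v hi hv hf hsmall hsz
    rw [squirtAOuter]
    by_cases hstop : i * i > v
    · rw [if_pos hstop]
      refine ⟨f, v, rfl, hf, hv, rfl, ?_⟩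
      intro j hj hdvd
      rcases lt_or_ge j i with h | h
      · exact hsmall j hj h hdvd
      · have : j * j ≤ v := Int.le_of_dvd hv hdvd
        nlinarith
    · rw [if_neg hstop]
      obtain ⟨v', f', heq, hv', hdvd, hprod, hf', hnd⟩ :=
        aInner_char v.toNat i v f hi hv hf (le_refl _)
      simp only [heq]
      have hv'le : v' ≤ v := Int.le_of_dvd hv hdvd
      obtain ⟨F, R, heq2, hF, hR, hprod2, hsq⟩ :=
        ih (i + 1) f' v' (by omega) hv' hf'
          (by
            intro j hj hji hjd
            rcases lt_or_ge j i with h | h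
            · exact hsmall j hj h (dvd_trans hjd hdvd)
            · have : j = i := by omega
              subst this
              exact hnd hjd)
          (by push_cast at hsz ⊢; nlinarith)
      exact ⟨F, R, heq2, hF, hR, by rw [hprod2, hprod], hsq⟩

-- characterization of B's loop: with enough fuel it returns the largest k ≥ 1 with k² ∣ v
lemma bLoop_char : ∀ (fuel : Nat) (k b v : Int), 1 ≤ k → 0 < v → 1 ≤ b →
    b * b ∣ v →
    (∀ j : Int, 1 ≤ j → j < k → j * j ∣ v → j ≤ b) →
    v < (k + (fuel : Int) - 1) * (k + (fuel : Int) - 1) →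
    ∃ M, squirtBLoop fuel k b v = M ∧ 1 ≤ M ∧ M * M ∣ v ∧
      (∀ j : Int, 1 ≤ j → j * j ∣ v → j ≤ M) := by
  intro fuel
  induction fuel with
  | zero =>
    intro k b v hk hv hb hbd hmax hsz
    refine ⟨b, rfl, hb, hbd, ?_⟩
    intro j hj hjd
    have : j * j ≤ v := Int.le_of_dvd hv hjd
    push_cast at hsz
    exact hmax j hj (by nlinarith) hjd
  | succ fuel ih =>
    intro k b v hk hv hb hbd hmax hsz
    rw [squirtBLoop]
    by_cases hc : k * k ≤ v
    · rw [if_pos hc]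
      by_cases hkd : k * k ∣ v
      · rw [if_pos ((PySem.Int.mod_eq_zero_iff_dvd v (k*k)).mpr hkd)]
        refine ih (k + 1) k v (by omega) hv hk hkd ?_ (by push_cast at hsz ⊢; nlinarith)
        intro j hj hji _; omega
      · rw [if_neg (fun h => hkd ((PySem.Int.mod_eq_zero_iff_dvd v (k*k)).mp h))]
        refine ih (k + 1) b v (by omega) hv hb hbd ?_ (by push_cast at hsz ⊢; nlinarith)
        intro j hj hji hjd
        rcases lt_or_ge j k with h | h
        · exact hmax j hj h hjd
        · have : j = k := by omega
          subst this
          exact absurd hjd hkd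
    · rw [if_neg hc]
      refine ⟨b, rfl, hb, hbd, ?_⟩
      intro j hj hjd
      have : j * j ≤ v := Int.le_of_dvd hv hjd
      exact hmax j hj (by nlinarith) hjd

-- ===== VERDICT (by name: the statement is the Claim_ definition above) =====
theorem square_factors_spec : Claim_equal_square_factors := by
  intro value _
  unfold Spec_square_factors square_factors square_factors_alt
  by_cases hv : 0 < value
  · have hvn : (value.toNat : Int) = value := Int.toNat_of_nonneg (le_of_lt hv)
    obtain ⟨F, R, heqA, hF, hR, hprodA, hsq⟩ :=
      aOuter_char (value.toNat + 1) 2 1 value (le_refl 2) hv one_pos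
        (by intro j hj hji _; omega)
        (by push_cast [hvn]; nlinarith)
    obtain ⟨M, heqB, hM, hMd, hMmax⟩ :=
      bLoop_char (value.toNat + 1) 1 1 value (le_refl 1) hv (le_refl 1)
        (one_dvd value)
        (by intro j hj hji _; omega)
        (by push_cast [hvn]; nlinarith)
    rw [one_mul, one_mul] at hprodA
    have hFM : F = M := by
      have h1 : F ≤ M := hMmax F (by omega) ⟨R, by rw [← hprodA]⟩
      have h2 : M ≤ F := int_key hF hR hsq hprodA M (by omega) hMd
      omega
    rw [heqA]
    simp only [heqB]
    rw [← hFM]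
    have hRdiv : PySem.Int.floordiv value (F * F) = R := by
      rw [PySem.Int.floordiv_eq_ediv_of_pos (by nlinarith), ← hprodA,
        Int.mul_ediv_cancel_left _ (by nlinarith)]
    rw [hRdiv]
  · have h1 : squirtAOuter (value.toNat + 1) 2 1 value = (1, value) := by
      have : value.toNat = 0 := by omega
      rw [this, squirtAOuter, if_pos (by omega)]
    have h2 : squirtBLoop (value.toNat + 1) 1 1 value = 1 := by
      have : value.toNat = 0 := by omega
      rw [this, squirtBLoop, if_neg (by omega)]
    rw [h1]
    simp only [h2]
    rw [show (1:Int) * 1 = 1 by ring, PySem.Int.floordiv_eq_ediv_of_pos one_pos, Int.ediv_one]
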